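-- pv_equiv track=rewrite | github.com/1998apoorvmalik/rna-eval | utility.py | get_alignment_to_sequence_mapping
-- ===== SOURCE A (Python) =====
-- def get_alignment_to_sequence_mapping(aligned_sequence):
--     """
--     Returns a dictionary mapping the indices of the aligned sequence to the indices of the unaligned sequence.
--
--     Args:
--         aligned_sequence (str): A string representing the aligned sequence, where '-' denotes a gap.
--
--     Returns:
--         dict: A dictionary mapping the indices of the aligned sequence to the indices of the unaligned sequence.
--
--     Example:
--         >>> get_alignment_to_sequence_mapping('AUCG-AUCG')
--         {0: 0, 1: 1, 2: 2, 3: 3, 4: 3, 5: 4, 6: 5, 7: 6}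
--     """
--     mapping = {}
--     j = 0
--     for i, x in enumerate(aligned_sequence):
--         if x != "-":
--             mapping[i] = j
--             j += 1
--         else:
--             mapping[i] = j - 1
--     return mapping
-- ===== SOURCE B (Python) =====
-- def get_alignment_to_sequence_mapping(aligned_sequence):
--     # Stateless per-index formula: the unaligned index of aligned position i
--     # is i minus the number of gaps in the prefix ending at i (which equals
--     # j for a non-gap position and j-1 for a gap, uniformly).
--     return {i: i - aligned_sequence[:i + 1].count("-")
--             for i in range(len(aligned_sequence))}
-- ===== Notes on version B (the rewrite author's own statement) =====
-- stated objective: simpler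
-- what changed: Replaces A's stateful loop (running counter j plus per-character branch) by a stateless per-index closed form: each aligned index i maps independently to i minus the gap count of its prefix, computed with str.count on a slice.
import Mathlib
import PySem

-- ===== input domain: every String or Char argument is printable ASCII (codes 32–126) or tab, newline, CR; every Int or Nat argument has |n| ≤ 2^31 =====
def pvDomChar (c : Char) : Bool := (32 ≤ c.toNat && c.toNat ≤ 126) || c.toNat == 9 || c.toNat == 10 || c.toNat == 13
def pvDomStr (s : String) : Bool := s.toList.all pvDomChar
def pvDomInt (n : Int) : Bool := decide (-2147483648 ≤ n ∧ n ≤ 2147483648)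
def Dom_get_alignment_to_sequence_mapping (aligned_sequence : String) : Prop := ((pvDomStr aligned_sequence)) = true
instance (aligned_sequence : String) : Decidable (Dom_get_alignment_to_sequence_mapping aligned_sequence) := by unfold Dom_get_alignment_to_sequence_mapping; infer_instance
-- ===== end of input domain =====

-- B replaces A's stateful counter loop by a stateless per-index closed form (i minus the gap
-- count of the prefix ending at i, via str.count on a slice); objective: simpler, not faster.

-- ===== PORT A =====
-- mapping = {}; j = 0; for i, x in enumerate(...): if x != '-': mapping[i] = j; j += 1 else: mapping[i] = j - 1
def get_alignment_to_sequence_mapping (aligned_sequence : String) : List (Int × Int) :=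
  let st := (PySem.List.enumerate aligned_sequence.toList 0).foldl
    (fun (st : PySem.Dict Int Int × Int) p =>
      if p.2 ≠ '-' then (st.1.insert p.1 st.2, st.2 + 1)
      else (st.1.insert p.1 (st.2 - 1), st.2))
    (PySem.Dict.empty, 0)
  st.1.items

-- ===== PORT B =====
-- {i: i - aligned_sequence[:i + 1].count("-") for i in range(len(aligned_sequence))}
-- (dict comprehension over distinct increasing keys: its items are this map, in range order)
def get_alignment_to_sequence_mapping_alt (aligned_sequence : String) : List (Int × Int) :=
  (PySem.List.pyRange 0 (PySem.Str.len aligned_sequence) 1).map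
    (fun i => (i, i - (PySem.Str.count (PySem.Str.slice aligned_sequence none (some (i + 1))) "-" : Int)))

-- ===== PRECONDITION & SPEC =====
def Spec_get_alignment_to_sequence_mapping (aligned_sequence : String) (out : List (Int × Int)) : Prop := out = get_alignment_to_sequence_mapping_alt aligned_sequence
instance (aligned_sequence : String) (out : List (Int × Int)) : Decidable (Spec_get_alignment_to_sequence_mapping aligned_sequence out) := by unfold Spec_get_alignment_to_sequence_mapping; infer_instance

-- ===== CLAIM (what is proved, stated in full; the proofs are below) =====
def Claim_equal_get_alignment_to_sequence_mapping : Prop := ∀ (aligned_sequence : String), Dom_get_alignment_to_sequence_mapping aligned_sequence → Spec_get_alignment_to_sequence_mapping aligned_sequence (get_alignment_to_sequence_mapping aligned_sequence)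

-- ===== LEMMAS AND PROOFS =====

-- Closed form of A's loop output: pairs (i, j) / (i, j-1) along the string.
def pvSpecList : List Char → Int → Int → List (Int × Int)
  | [], _, _ => []
  | x :: t, i, j =>
    if x ≠ '-' then (i, j) :: pvSpecList t (i + 1) (j + 1)
    else (i, j - 1) :: pvSpecList t (i + 1) j

-- A's loop: all dict keys so far are < i, so each insert appends.
theorem pvA_loop (cs : List Char) (i j : Int) (d : PySem.Dict Int Int)
    (h : ∀ k ∈ d.keys, k < i) :
    (((PySem.List.enumerate cs i).foldl
      (fun (st : PySem.Dict Int Int × Int) p =>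
        if p.2 ≠ '-' then (st.1.insert p.1 st.2, st.2 + 1)
        else (st.1.insert p.1 (st.2 - 1), st.2))
      (d, j)).1).items = d.items ++ pvSpecList cs i j := by
  induction cs generalizing i j d with
  | nil => simp [PySem.List.enumerate, pvSpecList]
  | cons x t ih =>
    have hnc : d.contains i = false := by
      by_contra hc
      have hc' : d.contains i = true := by simpa using hc
      exact absurd (h i ((PySem.Dict.contains_iff_mem_keys d i).mp hc')) (lt_irrefl i)
    have hkeys : ∀ v : Int, ∀ k ∈ (d.insert i v).keys, k < i + 1 := by
      intro v k hk
      rw [PySem.Dict.mem_keys_insert] at hk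
      rcases hk with rfl | hk'
      · omega
      · exact lt_trans (h k hk') (by omega)
    rw [PySem.List.enumerate_cons]
    simp only [List.foldl_cons, pvSpecList]
    by_cases hx : x ≠ '-'
    · rw [if_pos hx, if_pos hx, ih (i + 1) (j + 1) (d.insert i j) (hkeys j),
        PySem.Dict.items_insert_of_not_contains _ _ hnc]
      simp
    · rw [if_neg hx, if_neg hx, ih (i + 1) j (d.insert i (j - 1)) (hkeys (j - 1)),
        PySem.Dict.items_insert_of_not_contains _ _ hnc]
      simp

-- PySem.Chars.count with a single-character needle is List.count (fuel >= length suffices).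
theorem pvCountGo (c : Char) (l : List Char) (fuel acc : Nat) (hf : l.length <= fuel) :
    PySem.Chars.count.go [c] fuel l acc = acc + l.count c := by
  induction l generalizing fuel acc with
  | nil => rw [PySem.Chars.count.go.eq_def]; cases fuel <;> simp
  | cons x t ih =>
    cases fuel with
    | zero => simp at hf
    | succ f =>
      rw [PySem.Chars.count.go.eq_def]
      simp only [List.isPrefixOf, List.length_cons] at *
      by_cases hx : c = x
      · subst hx
        simp only [BEq.rfl, Bool.true_and]
        rw [if_pos (by simp)]
        have hdrop : List.drop (([] : List Char).length + 1) (c :: t) = t := rfl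
        rw [hdrop, ih f (acc + 1) (by omega)]
        simp
        ring
      · have hne : (c == x) = false := by simp [hx]
        simp only [hne, Bool.false_and]
        rw [if_neg (by simp)]
        rw [ih f acc (by omega)]
        simp [Ne.symm hx]

theorem pvCountSingle (c : Char) (l : List Char) :
    PySem.Chars.count l [c] = l.count c := by
  unfold PySem.Chars.count
  simpa using pvCountGo c l l.length 0 (le_refl _)

-- The shared closed form as a stateless per-index formula over prefix gap counts.
theorem pvSpec_closed (cs : List Char) (i j : Int) :
    pvSpecList cs i j =
      (List.range cs.length).map
        (fun k : Nat => ((i + (k : Int), j + (k : Int) - ((cs.take (k + 1)).count '-' : Int)) : Int × Int)) := by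
  induction cs generalizing i j with
  | nil => simp [pvSpecList]
  | cons x t ih =>
    simp only [List.length_cons, List.range_succ_eq_map, List.map_cons, List.map_map]
    by_cases hx : x ≠ '-'
    · rw [pvSpecList, if_pos hx, ih (i + 1) (j + 1), List.cons_eq_cons]
      refine ⟨by simp [hx], ?_⟩
      apply List.map_congr_left
      intro k _
      refine Prod.ext (by dsimp; ring) ?_
      simp only [Function.comp_apply, List.take_succ_cons, List.count_cons, Nat.succ_eq_add_one]
      rw [if_neg (by simp [hx])]
      push_cast [Nat.cast_add]
      ring
    · rw [pvSpecList, if_neg hx]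
      have hx' : x = '-' := by simpa using hx
      subst hx'
      rw [ih (i + 1) j, List.cons_eq_cons]
      refine ⟨by simp, ?_⟩
      apply List.map_congr_left
      intro k _
      refine Prod.ext (by dsimp; ring) ?_
      simp only [Function.comp_apply, List.take_succ_cons, List.count_cons, Nat.succ_eq_add_one]
      rw [if_pos (by simp)]
      push_cast
      ring

-- ===== VERDICT (by name: the statement is the Claim_ definition above) =====
theorem get_alignment_to_sequence_mapping_spec : Claim_equal_get_alignment_to_sequence_mapping := by
  intro s _
  unfold Spec_get_alignment_to_sequence_mapping
  unfold get_alignment_to_sequence_mapping get_alignment_to_sequence_mapping_alt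
  dsimp only
  rw [pvA_loop s.toList 0 0 PySem.Dict.empty (by simp [PySem.Dict.keys_empty])]
  rw [pvSpec_closed]
  have hempty : (PySem.Dict.empty : PySem.Dict Int Int).items = [] := rfl
  rw [hempty, List.nil_append]
  simp only [PySem.Str.len_eq, PySem.List.pyRange_zero_natCast, List.map_map]
  apply List.map_congr_left
  intro k _
  simp only [Function.comp_apply, zero_add]
  refine Prod.ext (by dsimp) ?_
  dsimp only
  have hsl : (PySem.Str.slice s none (some ((k : Int) + 1))).toList
      = s.toList.take (k + 1) := by
    rw [PySem.Str.toList_slice, PySem.Chars.slice_eq_listSlice]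
    have hc : ((k : Int) + 1) = ((k + 1 : Nat) : Int) := by push_cast; ring
    rw [hc, PySem.List.slice_to_natCast]
  rw [PySem.Str.count_eq, hsl]
  have hdash : ("-" : String).toList = ['-'] := rfl
  rw [hdash, pvCountSingle]
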